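-- pv_equiv track=rewrite | github.com/JoungheeKim/korean-question-answer-system | wiki_convert.py | merge_contexts_by_len
-- ===== SOURCE A (Python) =====
-- def merge_contexts_by_len(contexts, context_ids, max_paragraph_length=462):
--     assert len(contexts) == len(context_ids), "박살났음...."
--     sep_token = '[SEP]'
--     sep_idx = -1
--
--     paragraphs, paragraph_ids = [], []
--
--     stack_context = None
--     stack_context_id = None
--     for context, context_id in zip(contexts, context_ids):
--         if stack_context is None and stack_context_id is None:
--             stack_context = context
--             stack_context_id = context_id
--         else:
--             if len(stack_context_id) + len(context_id) < max_paragraph_length: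
--                 stack_context = sep_token.join([stack_context, context])
--                 stack_context_id = join_list([stack_context_id, context_id], sep_token)
--             else:
--                 paragraphs.append(stack_context)
--                 paragraph_ids.append(stack_context_id)
--                 stack_context = context
--                 stack_context_id = context_id
--     if stack_context is not None and stack_context_id is not None:
--         paragraphs.append(stack_context)
--         paragraph_ids.append(stack_context_id)
--     return paragraphs, paragraph_ids
--
-- def join_list(candidate_list, link_str, idx=-1):
--     link_list = [idx] * len(link_str)
--     if len(candidate_list) == 0:
--         return candidate_list
--     if len(candidate_list) == 1:
--         return candidate_list[0]
--
--     output_list = []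
--     if type(candidate_list[0]) == int:
--         output_list.append(candidate_list[0])
--     else:
--         output_list.extend(candidate_list[0])
--     for idx in range(1, len(candidate_list)):
--         output_list += link_list
--         if type(candidate_list[idx]) == int:
--             output_list.append(candidate_list[idx])
--         else:
--             output_list.extend(candidate_list[idx])
--     return output_list
-- ===== SOURCE B (Python) =====
-- def merge_contexts_by_len(contexts, context_ids, max_paragraph_length=462):
--     assert len(contexts) == len(context_ids), "박살났음...."
--     # Phase 1: partition into groups with a running id-length counter.
--     groups = []
--     cur_ctx, cur_ids, cur_len = [], [], 0
--     for context, context_id in zip(contexts, context_ids):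
--         if not cur_ctx:
--             cur_ctx, cur_ids, cur_len = [context], [context_id], len(context_id)
--         elif cur_len + len(context_id) < max_paragraph_length:
--             cur_ctx.append(context)
--             cur_ids.append(context_id)
--             cur_len += 5 + len(context_id)
--         else:
--             groups.append((cur_ctx, cur_ids))
--             cur_ctx, cur_ids, cur_len = [context], [context_id], len(context_id)
--     if cur_ctx:
--         groups.append((cur_ctx, cur_ids))
--     # Phase 2: materialise each group with one join.
--     paragraphs = ['[SEP]'.join(g) for g, _ in groups]
--     paragraph_ids = [flatten_ids(g) for _, g in groups]
--     return paragraphs, paragraph_ids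
--
-- def flatten_ids(id_lists):
--     out = []
--     for k, ids in enumerate(id_lists):
--         if k:
--             out += [-1] * 5
--         out += ids
--     return out
-- ===== Notes on version B (the rewrite author's own statement) =====
-- stated objective: alternative
-- what changed: Two-phase decomposition: phase 1 partitions (context, id) pairs into groups with a running id-length counter, phase 2 materialises each paragraph with one join/flatten, instead of A's single loop that re-joins the growing stack string and id list on every merge.
import Mathlib
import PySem

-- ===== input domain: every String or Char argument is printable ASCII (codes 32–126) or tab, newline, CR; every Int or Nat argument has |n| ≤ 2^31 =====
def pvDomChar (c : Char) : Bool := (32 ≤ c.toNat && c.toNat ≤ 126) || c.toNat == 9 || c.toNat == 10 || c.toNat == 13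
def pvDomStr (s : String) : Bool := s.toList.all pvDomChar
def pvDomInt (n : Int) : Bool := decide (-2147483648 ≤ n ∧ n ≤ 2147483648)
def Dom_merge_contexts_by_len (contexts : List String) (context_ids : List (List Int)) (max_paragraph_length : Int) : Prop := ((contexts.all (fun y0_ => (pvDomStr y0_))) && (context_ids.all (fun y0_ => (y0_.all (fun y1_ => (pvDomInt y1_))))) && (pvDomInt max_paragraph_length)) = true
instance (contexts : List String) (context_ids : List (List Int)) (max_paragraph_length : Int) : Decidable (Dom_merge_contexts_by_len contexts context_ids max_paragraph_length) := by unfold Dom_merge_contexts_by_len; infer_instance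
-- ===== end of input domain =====

-- B regroups the input in one pass (running id-length counter) and materialises each
-- paragraph with a single join, instead of A's repeated pairwise stack joins; equivalence
-- proved on inputs where len(contexts) == len(context_ids) (A's assert raises otherwise).


-- ===== PORT A =====
-- join_list, ported for A's only call shape (a list of List Int); the len-0 branch of the
-- Python returns the (empty) candidate list itself, which is [] here — exact at the call site.
def join_list (candidate_list : List (List Int)) (link_str : String) : List Int :=
  let link_list : List Int := List.replicate (PySem.Str.len link_str).toNat (-1)
  match candidate_list with
  | [] => []
  | [x] => x
  | x :: rest => rest.foldl (fun output_list y => output_list ++ link_list ++ y) x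

def merge_contexts_by_len (contexts : List String) (context_ids : List (List Int)) (max_paragraph_length : Int) : List String × List (List Int) :=
  let sep_token := "[SEP]"
  let step := fun (st : List String × List (List Int) × Option String × Option (List Int)) (p : String × List Int) =>
    let (paragraphs, paragraph_ids, stack_context, stack_context_id) := st
    match stack_context, stack_context_id with
    | none, none => (paragraphs, paragraph_ids, some p.1, some p.2)
    | some sc, some sci =>
      if (sci.length : Int) + (p.2.length : Int) < max_paragraph_length then
        (paragraphs, paragraph_ids, some (PySem.Str.join sep_token [sc, p.1]), some (join_list [sci, p.2] sep_token))
      else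
        (paragraphs ++ [sc], paragraph_ids ++ [sci], some p.1, some p.2)
    | _, _ => st  -- unreachable: A sets/clears both stacks together
  let (paragraphs, paragraph_ids, stack_context, stack_context_id) :=
    (contexts.zip context_ids).foldl step ([], [], none, none)
  match stack_context, stack_context_id with
  | some sc, some sci => (paragraphs ++ [sc], paragraph_ids ++ [sci])
  | _, _ => (paragraphs, paragraph_ids)

-- ===== PORT B =====
def flatten_ids (id_lists : List (List Int)) : List Int :=
  (PySem.List.enumerate id_lists).foldl
    (fun out p => (if p.1 == 0 then out else out ++ List.replicate 5 (-1)) ++ p.2) []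

def merge_contexts_by_len_alt (contexts : List String) (context_ids : List (List Int)) (max_paragraph_length : Int) : List String × List (List Int) :=
  let step := fun (st : List (List String × List (List Int)) × List String × List (List Int) × Int) (p : String × List Int) =>
    let (groups, cur_ctx, cur_ids, cur_len) := st
    if cur_ctx.isEmpty then
      (groups, [p.1], [p.2], (p.2.length : Int))
    else if cur_len + (p.2.length : Int) < max_paragraph_length then
      (groups, cur_ctx ++ [p.1], cur_ids ++ [p.2], cur_len + 5 + (p.2.length : Int))
    else
      (groups ++ [(cur_ctx, cur_ids)], [p.1], [p.2], (p.2.length : Int))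
  let (groups, cur_ctx, cur_ids, _) := (contexts.zip context_ids).foldl step ([], [], [], 0)
  let groups := if cur_ctx.isEmpty then groups else groups ++ [(cur_ctx, cur_ids)]
  (groups.map (fun g => PySem.Str.join "[SEP]" g.1), groups.map (fun g => flatten_ids g.2))

-- ===== PRECONDITION & SPEC =====
-- Pre_ excludes exactly the inputs where the Python assert len(contexts)==len(context_ids) raises.
def Pre_merge_contexts_by_len (contexts : List String) (context_ids : List (List Int)) (max_paragraph_length : Int) : Prop :=
  contexts.length = context_ids.length
instance (contexts : List String) (context_ids : List (List Int)) (max_paragraph_length : Int) : Decidable (Pre_merge_contexts_by_len contexts context_ids max_paragraph_length) := by unfold Pre_merge_contexts_by_len; infer_instance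
def pvWitness_merge_contexts_by_len : List String × List (List Int) × Int :=
  (["ab", "cd", "e"], [[1, 2], [3], [4, 5, 6]], 7)

def Spec_merge_contexts_by_len (contexts : List String) (context_ids : List (List Int)) (max_paragraph_length : Int) (out : List String × List (List Int)) : Prop := out = merge_contexts_by_len_alt contexts context_ids max_paragraph_length
instance (contexts : List String) (context_ids : List (List Int)) (max_paragraph_length : Int) (out : List String × List (List Int)) : Decidable (Spec_merge_contexts_by_len contexts context_ids max_paragraph_length out) := by unfold Spec_merge_contexts_by_len; infer_instance

-- ===== CLAIM (what is proved, stated in full; the proofs are below) =====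
def Claim_equal_merge_contexts_by_len : Prop := ∀ (contexts : List String) (context_ids : List (List Int)) (max_paragraph_length : Int), Dom_merge_contexts_by_len contexts context_ids max_paragraph_length → Pre_merge_contexts_by_len contexts context_ids max_paragraph_length → Spec_merge_contexts_by_len contexts context_ids max_paragraph_length (merge_contexts_by_len contexts context_ids max_paragraph_length)

-- ===== LEMMAS AND PROOFS =====

def sep5 : List Int := List.replicate 5 (-1)

-- flatten_ids' fold, once past index 0, is a plain snoc-fold
theorem flatten_aux (l : List (List Int)) : ∀ (s : Int) (acc : List Int), 1 ≤ s →
    (PySem.List.enumerate l s).foldl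
      (fun out p => (if p.1 == 0 then out else out ++ List.replicate 5 (-1)) ++ p.2) acc
    = l.foldl (fun out y => out ++ sep5 ++ y) acc := by
  induction l with
  | nil => intro s acc _; simp [PySem.List.enumerate]
  | cons x xs ih =>
    intro s acc hs
    rw [PySem.List.enumerate_cons]
    simp only [List.foldl_cons]
    rw [ih (s + 1) _ (by omega)]
    have : (s == 0) = false := by simp; omega
    simp [this, sep5, List.append_assoc]

theorem flatten_cons (x : List Int) (xs : List (List Int)) :
    flatten_ids (x :: xs) = xs.foldl (fun out y => out ++ sep5 ++ y) x := by
  unfold flatten_ids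
  rw [PySem.List.enumerate_cons]
  simp only [List.foldl_cons, zero_add]
  rw [flatten_aux xs 1 _ (by omega)]
  norm_num

theorem flatten_snoc (l : List (List Int)) (y : List Int) (h : l ≠ []) :
    flatten_ids (l ++ [y]) = flatten_ids l ++ sep5 ++ y := by
  cases l with
  | nil => exact absurd rfl h
  | cons a t =>
    rw [List.cons_append, flatten_cons, flatten_cons, List.foldl_append]
    simp

theorem chars_join_snoc (sep : List Char) (l : List (List Char)) (y : List Char) (h : l ≠ []) :
    PySem.Chars.join sep (l ++ [y]) = PySem.Chars.join sep l ++ sep ++ y := by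
  induction l with
  | nil => exact absurd rfl h
  | cons a t ih =>
    cases t with
    | nil => simp [PySem.Chars.join_singleton, PySem.Chars.join_cons_cons]
    | cons b u =>
      simp only [List.cons_append] at ih ⊢
      rw [PySem.Chars.join_cons_cons, ih (by simp),
        PySem.Chars.join_cons_cons sep a b u]
      simp [List.append_assoc]

theorem str_join_singleton (sep : String) (c : String) : PySem.Str.join sep [c] = c := by
  apply String.toList_inj.mp
  rw [PySem.Str.toList_join]
  simp [PySem.Chars.join_singleton]

theorem join_snoc (sep : String) (l : List String) (y : String) (h : l ≠ []) :
    PySem.Str.join sep (l ++ [y]) = PySem.Str.join sep [PySem.Str.join sep l, y] := by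
  apply String.toList_inj.mp
  rw [PySem.Str.toList_join, PySem.Str.toList_join]
  simp only [List.map_append, List.map_cons, List.map_nil]
  rw [chars_join_snoc sep.toList _ _ (by simpa using h),
    PySem.Chars.join_cons_cons, PySem.Chars.join_singleton, PySem.Str.toList_join]

theorem join_list_pair (a b : List Int) : join_list [a, b] "[SEP]" = a ++ sep5 ++ b := by
  simp [join_list, sep5, PySem.Str.len, List.append_assoc]

-- the invariant tying A's loop state to B's loop state
def InvState (astate : List String × List (List Int) × Option String × Option (List Int))
    (bstate : List (List String × List (List Int)) × List String × List (List Int) × Int) : Prop :=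
  astate.1 = bstate.1.map (fun g => PySem.Str.join "[SEP]" g.1) ∧
  astate.2.1 = bstate.1.map (fun g => flatten_ids g.2) ∧
  ((bstate.2.1 = [] ∧ bstate.2.2.1 = [] ∧ astate.2.2.1 = none ∧ astate.2.2.2 = none) ∨
   (bstate.2.1 ≠ [] ∧ bstate.2.2.1 ≠ [] ∧
    astate.2.2.1 = some (PySem.Str.join "[SEP]" bstate.2.1) ∧
    astate.2.2.2 = some (flatten_ids bstate.2.2.1) ∧
    bstate.2.2.2 = ((flatten_ids bstate.2.2.1).length : Int)))

theorem merge_contexts_by_len_spec : Claim_equal_merge_contexts_by_len := by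
  intro contexts context_ids m _ _
  unfold Spec_merge_contexts_by_len merge_contexts_by_len merge_contexts_by_len_alt
  suffices h : ∀ (l : List (String × List Int)) astate bstate, InvState astate bstate →
      (match (l.foldl (fun (st : List String × List (List Int) × Option String × Option (List Int)) p =>
          match st.2.2.1, st.2.2.2 with
          | none, none => (st.1, st.2.1, some p.1, some p.2)
          | some sc, some sci =>
            if (sci.length : Int) + (p.2.length : Int) < m then
              (st.1, st.2.1, some (PySem.Str.join "[SEP]" [sc, p.1]), some (join_list [sci, p.2] "[SEP]"))
            else
              (st.1 ++ [sc], st.2.1 ++ [sci], some p.1, some p.2)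
          | _, _ => st) astate) with
        | (paragraphs, paragraph_ids, stack_context, stack_context_id) =>
          match stack_context, stack_context_id with
          | some sc, some sci => (paragraphs ++ [sc], paragraph_ids ++ [sci])
          | _, _ => (paragraphs, paragraph_ids))
      = (match (l.foldl (fun (st : List (List String × List (List Int)) × List String × List (List Int) × Int) p =>
          if st.2.1.isEmpty then
            (st.1, [p.1], [p.2], (p.2.length : Int))
          else if st.2.2.2 + (p.2.length : Int) < m then
            (st.1, st.2.1 ++ [p.1], st.2.2.1 ++ [p.2], st.2.2.2 + 5 + (p.2.length : Int))
          else
            (st.1 ++ [(st.2.1, st.2.2.1)], [p.1], [p.2], (p.2.length : Int))) bstate) with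
        | (groups, cur_ctx, cur_ids, _) =>
          let groups := if cur_ctx.isEmpty then groups else groups ++ [(cur_ctx, cur_ids)]
          (groups.map (fun g => PySem.Str.join "[SEP]" g.1), groups.map (fun g => flatten_ids g.2))) by
    exact h (contexts.zip context_ids) ([], [], none, none) ([], [], [], 0)
      ⟨rfl, rfl, Or.inl ⟨rfl, rfl, rfl, rfl⟩⟩
  intro l
  induction l with
  | nil =>
    intro a b hinv
    obtain ⟨pa, pia, sc, sci⟩ := a
    obtain ⟨gs, cc, ci, cl⟩ := b
    obtain ⟨h1, h2, h3⟩ := hinv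
    simp only [List.foldl_nil]
    rcases h3 with ⟨hc, hi, hsc, hsci⟩ | ⟨hc, hi, hsc, hsci, hlen⟩ <;>
      simp_all
  | cons p t ih =>
    intro a b hinv
    simp only [List.foldl_cons]
    apply ih
    obtain ⟨pa, pia, sc, sci⟩ := a
    obtain ⟨gs, cc, ci, cl⟩ := b
    obtain ⟨h1, h2, h3⟩ := hinv
    rcases h3 with ⟨hc, hi, hsc, hsci⟩ | ⟨hc, hi, hsc, hsci, hlen⟩
    · -- empty stack: both start a new group
      simp only at hsc hsci h1 h2 hc hi
      subst hc hi hsc hsci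
      exact ⟨h1, h2, Or.inr (by simp [flatten_cons, str_join_singleton])⟩
    · -- nonempty stack
      simp only at hsc hsci h1 h2 hc hi hlen
      subst hsc hsci hlen
      have hcc : cc.isEmpty = false := List.isEmpty_eq_false_iff.mpr hc
      simp only [hcc, Bool.false_eq_true, if_false]
      by_cases hcond : ((flatten_ids ci).length : Int) + (p.2.length : Int) < m
      · simp only [hcond, if_true]
        refine ⟨h1, h2, Or.inr ⟨by simp [hc], by simp [hi], ?_, ?_, ?_⟩⟩
        · simp only
          rw [join_snoc "[SEP]" cc p.1 hc]
        · simp only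
          rw [flatten_snoc ci p.2 hi, join_list_pair]
        · simp only
          rw [flatten_snoc ci p.2 hi]
          simp [sep5]; ring
      · simp only [hcond, if_false]
        refine ⟨by simp [h1], by simp [h2], Or.inr ?_⟩
        simp [flatten_cons, str_join_singleton]

theorem pv_witness_ok :
    Dom_merge_contexts_by_len (pvWitness_merge_contexts_by_len.1) (pvWitness_merge_contexts_by_len.2.1) (pvWitness_merge_contexts_by_len.2.2) ∧
    Pre_merge_contexts_by_len (pvWitness_merge_contexts_by_len.1) (pvWitness_merge_contexts_by_len.2.1) (pvWitness_merge_contexts_by_len.2.2) := by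
  decide
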